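-- pv_equiv track=rewrite | github.com/gijun0725/Programmerse-school | 프로그래머스/lv1/68935. 3진법 뒤집기/3진법 뒤집기.py | solution
-- ===== SOURCE A (Python) =====
-- def solution(n):
--     answer = ''
--     answers=0
--     while(n>0):
--         extra=n%3
--         n=n//3
--         answer+=str(extra)
--     answer=str(answer)[::-1]
--     for i in range(len(answer)):
--         answers+=int(answer[i])*int(3**i)
--     return answers
-- ===== SOURCE B (Python) =====
-- def solution(n):
--     answer = 0
--     while n > 0:
--         answer = answer * 3 + n % 3
--         n //= 3
--     return answer
-- ===== Notes on version B (the rewrite author's own statement) =====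
-- stated objective: simpler
-- what changed: Replaces the two-phase pipeline (build a base-3 digit string, reverse it, then sum each digit times an explicit power) by a single Horner-style integer loop, keeping only one integer accumulator and no string.
import Mathlib
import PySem

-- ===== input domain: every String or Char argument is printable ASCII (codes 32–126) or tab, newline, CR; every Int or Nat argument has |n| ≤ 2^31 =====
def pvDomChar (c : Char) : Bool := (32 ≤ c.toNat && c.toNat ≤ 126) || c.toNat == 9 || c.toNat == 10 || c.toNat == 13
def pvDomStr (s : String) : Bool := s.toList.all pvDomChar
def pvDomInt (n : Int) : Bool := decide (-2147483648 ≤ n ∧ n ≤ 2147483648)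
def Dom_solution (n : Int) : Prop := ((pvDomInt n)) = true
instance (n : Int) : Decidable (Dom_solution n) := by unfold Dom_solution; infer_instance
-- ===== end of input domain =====

-- B replaces A's two phases (build a base-3 digit string, reverse it, sum int(digit)*3**i)
-- by one Horner-style integer loop with a single accumulator; objective: simpler.

-- ===== PORT A =====
-- A's while loop: append str(n % 3) to the digit string while n > 0 (the Python str is modelled as List Char)
def solutionLoop (n : Int) (answer : List Char) : List Char :=
  if n > 0 then
    solutionLoop (PySem.Int.floordiv n 3) (answer ++ PySem.Int.toChars (PySem.Int.mod n 3))
  else answer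
termination_by n.toNat
decreasing_by
  rw [PySem.Int.floordiv_eq_ediv_of_pos (by omega : (0:Int) < 3)]
  omega

def solution (n : Int) : Int :=
  let answer := solutionLoop n []
  -- answer = str(answer)[::-1]
  let answer := (PySem.Chars.slice? answer none none (-1)).getD []
  -- for i in range(len(answer)): answers += int(answer[i]) * int(3**i)   (i ≥ 0 here, so 3**i is 3 ^ i.toNat)
  (PySem.List.pyRange 0 (PySem.Chars.len answer) 1).foldl
    (fun answers i =>
      answers + (PySem.Int.ofChars? [(PySem.Chars.pyGet? answer i).getD ' ']).getD 0 * 3 ^ i.toNat) 0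

-- ===== PORT B =====
def solutionAltLoop (n answer : Int) : Int :=
  if n > 0 then
    solutionAltLoop (PySem.Int.floordiv n 3) (answer * 3 + PySem.Int.mod n 3)
  else answer
termination_by n.toNat
decreasing_by
  rw [PySem.Int.floordiv_eq_ediv_of_pos (by omega : (0:Int) < 3)]
  omega

def solution_alt (n : Int) : Int := solutionAltLoop n 0

-- ===== PRECONDITION & SPEC =====
def Spec_solution (n : Int) (out : Int) : Prop := out = solution_alt n
instance (n : Int) (out : Int) : Decidable (Spec_solution n out) := by unfold Spec_solution; infer_instance

-- ===== CLAIM (what is proved, stated in full; the proofs are below) =====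
def Claim_equal_solution : Prop := ∀ (n : Int), Dom_solution n → Spec_solution n (solution n)

-- ===== LEMMAS AND PROOFS =====

-- the base-3 digits of n, least significant first (mirrors both loops' recursion)
def pvDigits (n : Int) : List Int :=
  if n > 0 then PySem.Int.mod n 3 :: pvDigits (PySem.Int.floordiv n 3) else []
termination_by n.toNat
decreasing_by
  rw [PySem.Int.floordiv_eq_ediv_of_pos (by omega : (0:Int) < 3)]
  omega

-- value of a digit list read least-significant-first
def pvVal : List Int → Int
  | [] => 0
  | d :: t => d + 3 * pvVal t

def pvChr (d : Int) : Char := if d = 1 then '1' else if d = 2 then '2' else '0'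

theorem pvDigits_pos {n : Int} (h : n > 0) :
    pvDigits n = PySem.Int.mod n 3 :: pvDigits (PySem.Int.floordiv n 3) := by
  rw [pvDigits]; simp [h]

theorem pvDigits_nonpos {n : Int} (h : ¬ n > 0) : pvDigits n = [] := by
  rw [pvDigits]; simp [h]

theorem pvDigits_bounds (n : Int) : ∀ d ∈ pvDigits n, 0 ≤ d ∧ d < 3 := by
  fun_induction pvDigits n with
  | case1 n h ih =>
    intro d hd
    rw [List.mem_cons] at hd
    rcases hd with hd | hd
    · subst hd
      rw [PySem.Int.mod_eq_emod_of_pos (by omega : (0:Int) < 3)]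
      omega
    · exact ih d hd
  | case2 n h =>
    intro d hd
    simp at hd

theorem pvToChars_digit (d : Int) (h0 : 0 ≤ d) (h3 : d < 3) :
    PySem.Int.toChars d = [pvChr d] := by
  interval_cases d <;> decide

theorem pvOfChars_chr (d : Int) (h0 : 0 ≤ d) (h3 : d < 3) :
    PySem.Int.ofChars? [pvChr d] = some d := by
  interval_cases d <;> decide

theorem solutionLoop_eq (n : Int) (pre : List Char) :
    solutionLoop n pre = pre ++ (pvDigits n).map pvChr := by
  fun_induction solutionLoop n pre with
  | case1 n pre h ih =>
    have hm : PySem.Int.toChars (PySem.Int.mod n 3) = [pvChr (PySem.Int.mod n 3)] := by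
      apply pvToChars_digit <;>
        (rw [PySem.Int.mod_eq_emod_of_pos (by omega : (0:Int) < 3)]; omega)
    rw [ih, pvDigits_pos h, hm]
    simp
  | case2 n pre h =>
    rw [pvDigits_nonpos h]
    simp

theorem pvVal_append_singleton (l : List Int) (d : Int) :
    pvVal (l ++ [d]) = pvVal l + d * 3 ^ l.length := by
  induction l with
  | nil => simp [pvVal]
  | cons x t ih => simp [pvVal, ih]; ring

theorem solutionAltLoop_eq (n acc : Int) :
    solutionAltLoop n acc = pvVal (pvDigits n).reverse + acc * 3 ^ (pvDigits n).length := by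
  fun_induction solutionAltLoop n acc with
  | case1 n acc h ih =>
    rw [ih, pvDigits_pos h]
    simp [pvVal_append_singleton]
    ring
  | case2 n acc h =>
    rw [pvDigits_nonpos h]
    simp [pvVal]

theorem pvFoldAdd (g : Nat → Int) (l : List Nat) (acc : Int) :
    l.foldl (fun a k => a + g k) acc = acc + (l.map g).sum := by
  induction l generalizing acc with
  | nil => simp
  | cons x t ih => simp [ih]; ring

theorem pvSumRange (ds : List Int) :
    ((List.range ds.length).map (fun k => ds.getD k 0 * 3 ^ k)).sum = pvVal ds := by
  induction ds with
  | nil => simp [pvVal]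
  | cons d t ih =>
    rw [List.length_cons, List.range_succ_eq_map]
    simp only [List.map_cons, List.map_map, List.sum_cons]
    have : ((List.range t.length).map
        (fun k => (d :: t).getD (Nat.succ k) 0 * 3 ^ Nat.succ k)).sum
        = 3 * ((List.range t.length).map (fun k => t.getD k 0 * 3 ^ k)).sum := by
      rw [← List.sum_map_mul_left]
      congr 1
      apply List.map_congr_left
      intro k _
      simp [List.getD, pow_succ]
      ring
    simp only [Function.comp_def]
    rw [this, ih]
    simp [pvVal]

-- A's for-loop over the rendered digit string computes pvVal of the digit list it renders
theorem pvForLoop_eq (ds : List Int) (hb : ∀ d ∈ ds, 0 ≤ d ∧ d < 3) :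
    (PySem.List.pyRange 0 (PySem.Chars.len (ds.map pvChr)) 1).foldl
      (fun answers i =>
        answers + (PySem.Int.ofChars? [(PySem.Chars.pyGet? (ds.map pvChr) i).getD ' ']).getD 0
          * 3 ^ i.toNat) 0
    = pvVal ds := by
  have hlen : PySem.Chars.len (ds.map pvChr) = ((ds.length : Nat) : Int) := by simp
  rw [hlen, PySem.List.pyRange_zero_natCast, List.foldl_map]
  have h1 : List.foldl (fun (answers : Int) (k : Nat) =>
        answers + (PySem.Int.ofChars? [(PySem.Chars.pyGet? (ds.map pvChr) ((k : Nat) : Int)).getD ' ']).getD 0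
          * 3 ^ ((k : Nat) : Int).toNat) 0 (List.range ds.length)
      = List.foldl (fun (answers : Int) (k : Nat) => answers + ds.getD k 0 * 3 ^ k) 0
          (List.range ds.length) := by
    apply PySem.List.foldl_congr_mem
    intro acc k hk
    rw [List.mem_range] at hk
    have hds : ds[k]? = some (ds.getD k 0) := by
      rw [List.getD_eq_getElem?_getD, List.getElem?_eq_getElem hk]; simp
    obtain ⟨h0, h3⟩ := hb _ (List.mem_of_getElem? hds)
    simp only [PySem.Chars.pyGet?_eq_listPyGet?, PySem.List.pyGet?_natCast,
      List.getElem?_map, hds, Option.map_some, Option.getD_some, Int.toNat_natCast]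
    rw [pvOfChars_chr _ h0 h3]
    simp
  rw [h1, pvFoldAdd]
  simpa using pvSumRange ds

theorem solution_eq_pvVal (n : Int) : solution n = pvVal (pvDigits n).reverse := by
  unfold solution
  rw [solutionLoop_eq]
  simp only [List.nil_append]
  have hrev : (PySem.Chars.slice? ((pvDigits n).map pvChr) none none (-1)).getD []
      = ((pvDigits n).reverse).map pvChr := by
    simp [PySem.Chars.slice?_eq_listSlice?, PySem.List.slice?_none_none_neg_one]
  rw [hrev]
  exact pvForLoop_eq ((pvDigits n).reverse)
    (fun d hd => pvDigits_bounds n d (List.mem_reverse.mp hd))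

-- ===== VERDICT (by name: the statement is the Claim_ definition above) =====
theorem solution_spec : Claim_equal_solution := by
  intro n _
  unfold Spec_solution solution_alt
  rw [solutionAltLoop_eq, solution_eq_pvVal]
  ring
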